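-- pv_equiv track=rewrite | github.com/dawiddrobny/podstawy-programowania | 04-Functions/7,15.py | f
-- ===== SOURCE A (Python) =====
-- def f(detector):
--     current = 0
--     max_occupancy = 0
--     for event in detector:
--         if event == "+":
--             current += 1
--         elif event == "-":
--             current -= 1
--         max_occupancy = max(max_occupancy, current)
--     return max_occupancy >= 3
-- ===== SOURCE B (Python) =====
-- def f(detector):
--     # Divide and conquer: scan(seg) returns (total delta of seg, max prefix sum
--     # of seg including the empty prefix); halves are combined with
--     # (s1+s2, max(m1, s1+m2)). No left-to-right running state.
--     def scan(seg):
--         if len(seg) == 0: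
--             return (0, 0)
--         if len(seg) == 1:
--             d = 1 if seg[0] == "+" else -1 if seg[0] == "-" else 0
--             return (d, max(0, d))
--         mid = len(seg) // 2
--         s1, m1 = scan(seg[:mid])
--         s2, m2 = scan(seg[mid:])
--         return (s1 + s2, max(m1, s1 + m2))
--     return scan(detector)[1] >= 3
-- ===== Notes on version B (the rewrite author's own statement) =====
-- stated objective: alternative
-- what changed: Replaces A's single left-to-right pass maintaining a running sum and running max by a divide-and-conquer recursion that computes (total delta, max prefix sum) of each half and merges them with (s1+s2, max(m1, s1+m2)), then tests the whole list's max prefix sum against 3.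
import Mathlib
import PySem

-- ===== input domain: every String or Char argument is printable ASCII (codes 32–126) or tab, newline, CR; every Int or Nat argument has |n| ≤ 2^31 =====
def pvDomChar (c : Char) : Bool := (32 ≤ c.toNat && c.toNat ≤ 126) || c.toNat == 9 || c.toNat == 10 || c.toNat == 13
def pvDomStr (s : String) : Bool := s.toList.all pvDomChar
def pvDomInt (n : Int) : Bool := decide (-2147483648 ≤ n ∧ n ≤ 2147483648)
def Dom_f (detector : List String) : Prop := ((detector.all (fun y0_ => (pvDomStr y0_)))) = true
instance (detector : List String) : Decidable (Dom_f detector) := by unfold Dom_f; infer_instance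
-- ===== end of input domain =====

-- B replaces A's single left-to-right running-sum/running-max pass by a divide-and-conquer
-- recursion computing (total delta, max prefix sum) of each half and merging them (alternative algorithm).

-- ===== PORT A =====
-- literal port of A: fold carrying (current, max_occupancy)
def f (detector : List String) : Bool :=
  let st := detector.foldl
    (fun (p : Int × Int) event =>
      let current := if event = "+" then p.1 + 1 else if event = "-" then p.1 - 1 else p.1
      (current, max p.2 current))
    (0, 0)
  decide (st.2 ≥ 3)

-- ===== PORT B =====
-- Source B's scan: (total delta, max prefix sum incl. empty prefix) of a segment, by halving
def pvScan : List String → Int × Int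
  | [] => (0, 0)
  | [e] =>
      let d : Int := if e = "+" then 1 else if e = "-" then -1 else 0
      (d, max 0 d)
  | a :: b :: t =>
      let mid := (a :: b :: t).length / 2
      let p1 := pvScan ((a :: b :: t).take mid)
      let p2 := pvScan ((a :: b :: t).drop mid)
      (p1.1 + p2.1, max p1.2 (p1.1 + p2.2))
termination_by l => l.length
decreasing_by
  · simp [List.length_take]; omega
  · simp; omega

def f_alt (detector : List String) : Bool :=
  decide ((pvScan detector).2 ≥ 3)

-- ===== PRECONDITION & SPEC =====
def Spec_f (detector : List String) (out : Bool) : Prop := out = f_alt detector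
instance (detector : List String) (out : Bool) : Decidable (Spec_f detector out) := by unfold Spec_f; infer_instance

-- ===== CLAIM (what is proved, stated in full; the proofs are below) =====
def Claim_equal_f : Prop := ∀ (detector : List String), Dom_f detector → Spec_f detector (f detector)

-- ===== LEMMAS AND PROOFS =====

-- per-event delta and the two specification quantities: total delta, max prefix sum (incl. empty prefix)
def pvD (e : String) : Int := if e = "+" then 1 else if e = "-" then -1 else 0

def pvSum (l : List String) : Int := (l.map pvD).sum

def pvMaxPref : List String → Int
  | [] => 0
  | e :: t => max 0 (pvD e + pvMaxPref t)

lemma pvMaxPref_nonneg (l : List String) : 0 ≤ pvMaxPref l := by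
  cases l <;> simp [pvMaxPref]

lemma pvSum_append (l₁ l₂ : List String) : pvSum (l₁ ++ l₂) = pvSum l₁ + pvSum l₂ := by
  simp [pvSum]

lemma pvMaxPref_append (l₁ l₂ : List String) :
    pvMaxPref (l₁ ++ l₂) = max (pvMaxPref l₁) (pvSum l₁ + pvMaxPref l₂) := by
  induction l₁ with
  | nil => have := pvMaxPref_nonneg l₂; simp [pvMaxPref, pvSum]; omega
  | cons e t ih =>
    simp only [List.cons_append, pvMaxPref, ih]
    have : pvSum (e :: t) = pvD e + pvSum t := by simp [pvSum]
    rw [this]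
    omega

-- B's recursion computes exactly (pvSum, pvMaxPref)
lemma pvScan_eq (l : List String) : pvScan l = (pvSum l, pvMaxPref l) := by
  induction l using pvScan.induct with
  | case1 => simp [pvScan, pvSum, pvMaxPref]
  | case2 e => simp [pvScan, pvSum, pvMaxPref, pvD]
  | case3 a b t mid ih1 ih2 =>
    rw [pvScan, ih1, ih2]
    have h := List.take_append_drop ((a :: b :: t).length / 2) (a :: b :: t)
    dsimp only
    rw [show pvSum (a :: b :: t) = pvSum ((a :: b :: t).take ((a :: b :: t).length / 2)
          ++ (a :: b :: t).drop ((a :: b :: t).length / 2)) by rw [h],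
        show pvMaxPref (a :: b :: t) = pvMaxPref ((a :: b :: t).take ((a :: b :: t).length / 2)
          ++ (a :: b :: t).drop ((a :: b :: t).length / 2)) by rw [h],
        pvSum_append, pvMaxPref_append]

-- A's fold state in terms of pvSum / pvMaxPref (invariant: cur ≤ mx)
lemma pv_fold_eq (l : List String) : ∀ (cur mx : Int), cur ≤ mx →
    (l.foldl
      (fun (p : Int × Int) event =>
        let current := if event = "+" then p.1 + 1 else if event = "-" then p.1 - 1 else p.1
        (current, max p.2 current))
      (cur, mx))
    = (cur + pvSum l, max mx (cur + pvMaxPref l)) := by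
  induction l with
  | nil => intro cur mx h; simp [pvSum, pvMaxPref]; omega
  | cons e t ih =>
    intro cur mx h
    have hd : (if e = "+" then cur + 1 else if e = "-" then cur - 1 else cur) = cur + pvD e := by
      unfold pvD; split_ifs <;> ring
    simp only [List.foldl, hd]
    rw [ih (cur + pvD e) (max mx (cur + pvD e)) (le_max_right _ _)]
    have hs : pvSum (e :: t) = pvD e + pvSum t := by simp [pvSum]
    have hm : pvMaxPref (e :: t) = max 0 (pvD e + pvMaxPref t) := rfl
    have hnn := pvMaxPref_nonneg t
    rw [hs, hm]
    simp only [Prod.mk.injEq]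
    constructor
    · ring
    · omega

-- ===== VERDICT (by name: the statement is the Claim_ definition above) =====
theorem f_spec : Claim_equal_f := by
  intro detector _
  show f detector = f_alt detector
  unfold f f_alt
  rw [pv_fold_eq detector 0 0 le_rfl, pvScan_eq]
  have := pvMaxPref_nonneg detector
  simp only [zero_add]
  rw [max_eq_right this]
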